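-- pv_equiv track=rewrite | github.com/ddu0422/study | algorithm/baekjoon/greedy/silver4/1969.py | solution
-- ===== SOURCE A (Python) =====
-- from collections import Counter
--
-- def solution(text):
--     dna = ''
--     answer = 0
--
--     for i in range(len(text[0])):
--         temp = []
--         for j in range(len(text)):
--             temp.append(text[j][i])
--         alpha, count = sorted(Counter(temp).items(), key=lambda x: (-x[1], x[0]))[0]
--
--         dna += alpha
--         answer += (len(text) - count)
--
--     return [dna, answer]
-- ===== SOURCE B (Python) =====
-- def solution(text):
--     n = len(text)
--     dna = []
--     answer = 0
--     for i in range(len(text[0])):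
--         # sort the column and scan its runs: longest run wins, first (smallest char) on ties
--         s = sorted(row[i] for row in text)
--         best_c = cur_c = s[0]
--         best_len = cur_len = 0
--         for c in s:
--             if c == cur_c:
--                 cur_len += 1
--             else:
--                 cur_c, cur_len = c, 1
--             if cur_len > best_len:
--                 best_c, best_len = cur_c, cur_len
--         dna.append(best_c)
--         answer += n - best_len
--     return [''.join(dna), answer]
-- ===== Notes on version B (the rewrite author's own statement) =====
-- stated objective: alternative
-- what changed: Replaces A's per-column frequency counting (Counter of the column, sort its items by (-count, char), take the first) with a sort-and-run-scan: each column is sorted and a single scan over it tracks the current run and keeps the longest run, a strict '>' making the first (alphabetically smallest) maximal run win ties; no frequency table or Counter exists anywhere.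
import Mathlib
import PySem

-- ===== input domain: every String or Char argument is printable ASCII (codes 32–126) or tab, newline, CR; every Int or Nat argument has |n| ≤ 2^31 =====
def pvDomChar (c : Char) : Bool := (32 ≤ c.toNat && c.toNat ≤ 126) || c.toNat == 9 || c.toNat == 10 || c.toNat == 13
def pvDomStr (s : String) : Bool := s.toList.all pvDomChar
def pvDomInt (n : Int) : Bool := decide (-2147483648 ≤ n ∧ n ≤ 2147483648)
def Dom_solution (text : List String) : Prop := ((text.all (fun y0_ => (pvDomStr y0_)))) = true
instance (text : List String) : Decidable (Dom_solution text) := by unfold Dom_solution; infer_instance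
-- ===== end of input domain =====

-- B replaces A's per-column Counter + sort-of-items pick by sorting each column and scanning its
-- runs (longest run wins, first run on ties = smallest char); objective: alternative algorithm.

-- ===== PORT A =====
-- column loop: for each position i, collect the column's chars, Counter + sorted by (-count, char), take [0]
def solution (text : List String) : String × Int :=
  let r := (PySem.List.pyRange 0 (PySem.Str.len (PySem.List.pyGetD text 0 "")) 1).foldl
    (fun (st : List Char × Int) i =>
      let temp : List Char := (PySem.List.pyRange 0 (PySem.List.len text) 1).foldl
        (fun acc j => acc ++ [PySem.List.pyGetD (PySem.List.pyGetD text j "").toList i ' ']) []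
      let best := PySem.List.pyGetD
        (PySem.List.sorted2 (PySem.Dict.counter temp).items (fun x => -x.2) (fun x => x.1)) 0 (' ', 0)
      (st.1 ++ [best.1], st.2 + (PySem.List.len text - best.2)))
    ([], 0)
  (String.ofList r.1, r.2)

-- ===== PORT B =====
-- row[i] of Source B's generator expression
def colf (i : Int) (s : String) : Char := PySem.List.pyGetD s.toList i ' '

-- one step of Source B's inner loop; state = (best_c, best_len, cur_c, cur_len)
def scanStep (st : Char × Int × Char × Int) (c : Char) : Char × Int × Char × Int :=
  let cur := if c == st.2.2.1 then (st.2.2.1, st.2.2.2 + 1) else (c, (1 : Int))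
  if st.2.1 < cur.2 then (cur.1, cur.2, cur.1, cur.2) else (st.1, st.2.1, cur.1, cur.2)

def solution_alt (text : List String) : String × Int :=
  let n := PySem.List.len text
  let r := (PySem.List.pyRange 0 (PySem.Str.len (PySem.List.pyGetD text 0 "")) 1).foldl
    (fun (st : List Char × Int) i =>
      let s := PySem.List.sorted (text.map (colf i)) (fun c => c) false
      let c0 := PySem.List.pyGetD s 0 ' '
      let b := s.foldl scanStep (c0, 0, c0, 0)
      (st.1 ++ [b.1], st.2 + (n - b.2.1)))
    ([], 0)
  (String.ofList r.1, r.2)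

-- ===== PRECONDITION & SPEC =====
-- A raises IndexError on empty input (text[0]) and when some string is shorter than text[0]; Pre_ excludes exactly those.
def Pre_solution (text : List String) : Prop :=
  text ≠ [] ∧ ∀ s ∈ text, PySem.Str.len (PySem.List.pyGetD text 0 "") ≤ PySem.Str.len s
instance (text : List String) : Decidable (Pre_solution text) := by unfold Pre_solution; infer_instance
def pvWitness_solution : List String := (["ACGT", "ACCT", "GCGT"])

def Spec_solution (text : List String) (out : String × Int) : Prop := out = solution_alt text
instance (text : List String) (out : String × Int) : Decidable (Spec_solution text out) := by unfold Spec_solution; infer_instance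

-- ===== CLAIM (what is proved, stated in full; the proofs are below) =====
def Claim_equal_solution : Prop := ∀ (text : List String), Dom_solution text → Pre_solution text → Spec_solution text (solution text)

-- ===== LEMMAS AND PROOFS =====
-- the strict order behind A's sort key (-count, char)
def pvLt (a b : Char × Int) : Bool :=
  decide (b.2 < a.2) || (!decide (a.2 < b.2) && decide (a.1 < b.1))

lemma pvLt_iff (a b : Char × Int) : pvLt a b = true ↔ (b.2 < a.2 ∨ (¬ a.2 < b.2 ∧ a.1 < b.1)) := by
  simp [pvLt]

lemma pvLt_irrefl (a : Char × Int) : pvLt a a = false := by simp [pvLt]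

lemma pvLt_asymm {a b : Char × Int} (h : pvLt a b = true) : pvLt b a = false := by
  rw [pvLt_iff] at h
  rw [Bool.eq_false_iff, Ne, pvLt_iff]
  rcases h with h | ⟨h1, h2⟩
  · rintro (h' | ⟨h1', h2'⟩) <;> omega
  · rintro (h' | ⟨h1', h2'⟩)
    · omega
    · exact absurd h2 (lt_asymm h2')

lemma pvLt_trans {a b c : Char × Int} (h1 : pvLt a b = true) (h2 : pvLt b c = true) :
    pvLt a c = true := by
  rw [pvLt_iff] at h1 h2 ⊢
  rcases h1 with h1 | ⟨h1, h1'⟩ <;> rcases h2 with h2 | ⟨h2, h2'⟩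
  · left; omega
  · left; omega
  · left; omega
  · right; exact ⟨by omega, lt_trans h1' h2'⟩

lemma pvLt_eq_of_not_either {a b : Char × Int} (h1 : pvLt a b = false) (h2 : pvLt b a = false) :
    a = b := by
  rw [Bool.eq_false_iff, Ne, pvLt_iff] at h1 h2
  push Not at h1 h2
  have h2' : a.2 = b.2 := by omega
  have hc : a.1 = b.1 := le_antisymm (h2.2 (by omega)) (h1.2 (by omega))
  exact Prod.ext hc h2'

lemma pvLt_false_iff (a b : Char × Int) :
    pvLt a b = false ↔ (a.2 ≤ b.2 ∧ (b.2 ≤ a.2 → b.1 ≤ a.1)) := by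
  rw [Bool.eq_false_iff, Ne, pvLt_iff]
  push Not
  exact Iff.rfl

lemma sorted2_eq_foldl (its : List (Char × Int)) :
    PySem.List.sorted2 its (fun x => -x.2) (fun x => x.1) false
      = its.foldl (fun acc x => PySem.List.insertBy pvLt x acc) [] := by
  simp [PySem.List.sorted2]; rfl

-- minimal-head invariant for A's insertion sort
def HeadMin (l : List (Char × Int)) : Prop :=
  ∀ h, l.head? = some h → ∀ y ∈ l, pvLt y h = false

lemma headMin_insertBy (x : Char × Int) (acc : List (Char × Int)) (hm : HeadMin acc) :
    HeadMin (PySem.List.insertBy pvLt x acc) := by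
  cases acc with
  | nil =>
    intro h hh y hy
    simp [PySem.List.insertBy] at hh hy
    rw [hy, ← hh]; exact pvLt_irrefl x
  | cons a as =>
    by_cases hx : pvLt x a = true
    · have hins : PySem.List.insertBy pvLt x (a :: as) = x :: a :: as := by
        simp [PySem.List.insertBy, hx]
      intro h hh y hy
      rw [hins] at hh hy
      have hh' : h = x := by simp at hh; exact hh.symm
      rw [hh']
      rcases List.mem_cons.1 hy with hy1 | hy2
      · rw [hy1]; exact pvLt_irrefl x
      rcases List.mem_cons.1 hy2 with hy1 | hy3
      · rw [hy1]; exact pvLt_asymm hx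
      · have hya := hm a rfl y (List.mem_cons_of_mem a hy3)
        by_cases hyx : pvLt y x = true
        · exact absurd (pvLt_trans hyx hx) (by simp [hya])
        · simpa using hyx
    · have hins : PySem.List.insertBy pvLt x (a :: as) = a :: PySem.List.insertBy pvLt x as := by
        simp [PySem.List.insertBy, hx]
      intro h hh y hy
      rw [hins] at hh hy
      have hh' : h = a := by simp at hh; exact hh.symm
      rw [hh']
      rcases List.mem_cons.1 hy with hy1 | hy2
      · rw [hy1]; exact pvLt_irrefl a
      rcases (PySem.List.mem_insertBy pvLt x y as).1 hy2 with hy1 | hy3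
      · rw [hy1]; simpa using hx
      · exact hm a rfl y (List.mem_cons_of_mem a hy3)

lemma headMin_foldl (xs : List (Char × Int)) :
    ∀ acc, HeadMin acc → HeadMin (xs.foldl (fun acc x => PySem.List.insertBy pvLt x acc) acc) := by
  induction xs with
  | nil => intro acc h; simpa using h
  | cons x xs ih => intro acc h; exact ih _ (headMin_insertBy x acc h)

-- A's pick is a member of the items list that nothing beats under pvLt
lemma pickA_spec (its : List (Char × Int)) (hne : its ≠ []) :
    PySem.List.pyGetD (PySem.List.sorted2 its (fun x => -x.2) (fun x => x.1)) 0 (' ', 0) ∈ its ∧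
    ∀ y ∈ its, pvLt y (PySem.List.pyGetD (PySem.List.sorted2 its (fun x => -x.2) (fun x => x.1)) 0 (' ', 0)) = false := by
  rw [sorted2_eq_foldl]
  have hperm : (its.foldl (fun acc x => PySem.List.insertBy pvLt x acc) []).Perm its := by
    simpa using PySem.List.foldl_insertBy_perm pvLt its []
  have hmin : HeadMin (its.foldl (fun acc x => PySem.List.insertBy pvLt x acc) []) :=
    headMin_foldl its [] (by intro h hh; simp at hh)
  cases hres : its.foldl (fun acc x => PySem.List.insertBy pvLt x acc) [] with
  | nil => exact absurd ((List.Perm.nil_eq (hres ▸ hperm)).symm) hne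
  | cons h t =>
    rw [hres] at hperm hmin
    constructor
    · simp only [PySem.List.pyGetD_zero_cons]
      exact hperm.mem_iff.1 (by simp)
    · intro y hy
      simp only [PySem.List.pyGetD_zero_cons]
      exact hmin h rfl y (hperm.mem_iff.2 hy)

lemma items_ne_nil (l : List Char) (hl : l ≠ []) : (PySem.Dict.counter l).items ≠ [] := by
  rw [PySem.Dict.items_counter]
  cases l with
  | nil => exact absurd rfl hl
  | cons c cs =>
    intro hcontra
    have : c ∈ PySem.Set.ofList (c :: cs) := (PySem.Set.mem_ofList _ _).2 (by simp)
    have := List.ne_nil_of_mem (List.mem_map_of_mem (f := fun k => (k, ((c :: cs).count k : Int))) this)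
    exact this hcontra

-- invariant of Source B's run scan over the processed prefix p
def ScanInv (p : List Char) (st : Char × Int × Char × Int) : Prop :=
  st.2.2.1 ∈ p ∧ st.2.2.2 = (p.count st.2.2.1 : Int) ∧ (∀ x ∈ p, x ≤ st.2.2.1) ∧
  st.1 ∈ p ∧ st.2.1 = (p.count st.1 : Int) ∧
  ∀ x ∈ p, pvLt (x, (p.count x : Int)) (st.1, st.2.1) = false

lemma count_append_singleton (p : List Char) (c x : Char) :
    (p ++ [c]).count x = p.count x + (if c = x then 1 else 0) := by
  by_cases h : c = x
  · subst h; simp [List.count_append]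
  · simp [List.count_append, h]

lemma scanStep_inv (p : List Char) (c : Char) (st : Char × Int × Char × Int)
    (hinv : ScanInv p st) (hle : ∀ x ∈ p, x ≤ c) : ScanInv (p ++ [c]) (scanStep st c) := by
  obtain ⟨bc, bl, cc, cl⟩ := st
  obtain ⟨hccm, hcl, hmax, hbcm, hbl, hbest⟩ := hinv
  simp only at hccm hcl hmax hbcm hbl hbest
  by_cases hc : c = cc
  · subst hc
    have hccnt : (p ++ [c]).count c = p.count c + 1 := by rw [count_append_singleton]; simp
    by_cases hb : bl < cl + 1
    · have hstep : scanStep (bc, bl, c, cl) c = (c, cl + 1, c, cl + 1) := by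
        simp [scanStep, hb]
      rw [hstep]
      refine ⟨by simp, by simp [hccnt, hcl], ?_, by simp, by simp [hccnt, hcl], ?_⟩
      · intro x hx
        rcases List.mem_append.1 hx with hx | hx
        · exact hmax x hx
        · simp at hx; rw [hx]
      · intro x hx
        by_cases hxc : x = c
        · subst hxc
          show pvLt (x, ((p ++ [x]).count x : Int)) (x, cl + 1) = false
          rw [hccnt, pvLt_false_iff]
          refine ⟨?_, fun _ => le_refl x⟩
          simp only
          push_cast
          omega
        · have hxp : x ∈ p := by
            rcases List.mem_append.1 hx with h | h
            · exact h
            · simp at h; exact absurd h hxc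
          have hcnt : (p ++ [c]).count x = p.count x := by
            rw [count_append_singleton, if_neg (fun h => hxc h.symm)]; omega
          have hold := (pvLt_false_iff _ _).1 (hbest x hxp)
          simp only at hold
          have hold1 := hold.1
          show pvLt (x, ((p ++ [c]).count x : Int)) (c, cl + 1) = false
          rw [hcnt, pvLt_false_iff]
          simp only
          refine ⟨by omega, fun h => absurd h (by omega)⟩
    · have hstep : scanStep (bc, bl, c, cl) c = (bc, bl, c, cl + 1) := by
        simp [scanStep, hb]
      rw [hstep]
      have hbcc : bc ≠ c := by
        intro h; subst h
        rw [hbl, hcl] at hb; omega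
      have hbcnt : (p ++ [c]).count bc = p.count bc := by
        rw [count_append_singleton, if_neg (fun h => hbcc h.symm)]; omega
      refine ⟨by simp, by simp [hccnt, hcl], ?_, List.mem_append_left _ hbcm, by simp [hbcnt, hbl], ?_⟩
      · intro x hx
        rcases List.mem_append.1 hx with hx | hx
        · exact hmax x hx
        · simp at hx; rw [hx]
      · intro x hx
        by_cases hxc : x = c
        · subst hxc
          show pvLt (x, ((p ++ [x]).count x : Int)) (bc, bl) = false
          rw [hccnt, pvLt_false_iff]
          simp only
          refine ⟨by push_cast; omega, fun _ => hmax bc hbcm⟩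
        · have hxp : x ∈ p := by
            rcases List.mem_append.1 hx with h | h
            · exact h
            · simp at h; exact absurd h hxc
          have hcnt : (p ++ [c]).count x = p.count x := by
            rw [count_append_singleton, if_neg (fun h => hxc h.symm)]; omega
          show pvLt (x, ((p ++ [c]).count x : Int)) (bc, bl) = false
          rw [hcnt]
          exact hbest x hxp
  · -- new character c, strictly above everything in p
    have hstep1 : scanStep (bc, bl, cc, cl) c = if bl < 1 then (c, 1, c, 1) else (bc, bl, c, 1) := by
      simp [scanStep, beq_iff_eq, hc]
    have hblpos : (1 : Int) ≤ bl := by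
      rw [hbl]
      exact_mod_cast List.count_pos_iff.2 hbcm
    have hstep : scanStep (bc, bl, cc, cl) c = (bc, bl, c, 1) := by
      rw [hstep1, if_neg (by omega)]
    rw [hstep]
    have hcnp : c ∉ p := by
      intro hcp
      exact hc (le_antisymm (hle cc hccm) (hmax c hcp) ▸ rfl)
    have hccnt : (p ++ [c]).count c = 1 := by
      rw [count_append_singleton, List.count_eq_zero.2 hcnp]; simp
    have hbcc : bc ≠ c := fun h => hcnp (h ▸ hbcm)
    have hbcnt : (p ++ [c]).count bc = p.count bc := by
      rw [count_append_singleton, if_neg (fun h => hbcc h.symm)]; omega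
    refine ⟨by simp, by simp [hccnt], ?_, List.mem_append_left _ hbcm, by simp [hbcnt, hbl], ?_⟩
    · intro x hx
      rcases List.mem_append.1 hx with hx | hx
      · exact hle x hx
      · simp at hx; rw [hx]
    · intro x hx
      by_cases hxc : x = c
      · subst hxc
        show pvLt (x, ((p ++ [x]).count x : Int)) (bc, bl) = false
        rw [hccnt, pvLt_false_iff]
        simp only
        refine ⟨by push_cast; omega, fun _ => hle bc hbcm⟩
      · have hxp : x ∈ p := by
          rcases List.mem_append.1 hx with h | h
          · exact h
          · simp at h; exact absurd h hxc
        have hcnt : (p ++ [c]).count x = p.count x := by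
          rw [count_append_singleton, if_neg (fun h => hxc h.symm)]; omega
        show pvLt (x, ((p ++ [c]).count x : Int)) (bc, bl) = false
        rw [hcnt]
        exact hbest x hxp

lemma scan_fold (rest : List Char) :
    ∀ (p : List Char) (st : Char × Int × Char × Int), ScanInv p st →
      (∀ x ∈ p, ∀ y ∈ rest, x ≤ y) → rest.Pairwise (· ≤ ·) →
      ScanInv (p ++ rest) (rest.foldl scanStep st) := by
  induction rest with
  | nil => intro p st h _ _; simpa using h
  | cons c rest ih =>
    intro p st h hcross hpw
    have h1 : ScanInv (p ++ [c]) (scanStep st c) :=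
      scanStep_inv p c st h (fun x hx => hcross x hx c (by simp))
    have h2 := ih (p ++ [c]) (scanStep st c) h1
      (fun x hx y hy => by
        rcases List.mem_append.1 hx with hx | hx
        · exact hcross x hx y (by simp [hy])
        · simp at hx; rw [hx]
          exact (List.pairwise_cons.1 hpw).1 y hy)
      (List.pairwise_cons.1 hpw).2
    simpa [List.append_assoc] using h2

-- per-column equality of the two picks
lemma col_pick_eq (col : List Char) (hne : col ≠ []) :
    PySem.List.pyGetD (PySem.List.sorted2 (PySem.Dict.counter col).items (fun x => -x.2) (fun x => x.1)) 0 (' ', 0)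
      = (((PySem.List.sorted col (fun c => c) false).foldl scanStep
            (PySem.List.pyGetD (PySem.List.sorted col (fun c => c) false) 0 ' ', 0,
             PySem.List.pyGetD (PySem.List.sorted col (fun c => c) false) 0 ' ', 0)).1,
         ((PySem.List.sorted col (fun c => c) false).foldl scanStep
            (PySem.List.pyGetD (PySem.List.sorted col (fun c => c) false) 0 ' ', 0,
             PySem.List.pyGetD (PySem.List.sorted col (fun c => c) false) 0 ' ', 0)).2.1) := by
  have hsp : (PySem.List.sorted col (fun c => c) false).Perm col := PySem.List.sorted_perm col _ _
  have hpw : (PySem.List.sorted col (fun c => c) false).Pairwise (· ≤ ·) :=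
    PySem.List.sorted_pairwise col (fun c => c)
  cases hs : PySem.List.sorted col (fun c => c) false with
  | nil => exact absurd ((List.Perm.nil_eq (hs ▸ hsp)).symm) hne
  | cons a t =>
    rw [hs] at hsp hpw
    -- run the scan: first step turns (a,0,a,0) into (a,1,a,1)
    have hstep0 : scanStep (PySem.List.pyGetD (a :: t) 0 ' ', 0, PySem.List.pyGetD (a :: t) 0 ' ', 0) a
        = (a, 1, a, 1) := by
      simp [PySem.List.pyGetD_zero_cons, scanStep]
    have hinv0 : ScanInv [a] (a, 1, a, 1) := by
      refine ⟨by simp, by simp, by simp, by simp, by simp, ?_⟩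
      intro x hx
      simp at hx; rw [hx]
      simpa using pvLt_irrefl (a, 1)
    have hinv : ScanInv ([a] ++ t) ((a :: t).foldl scanStep
        (PySem.List.pyGetD (a :: t) 0 ' ', 0, PySem.List.pyGetD (a :: t) 0 ' ', 0)) := by
      rw [List.foldl_cons, hstep0]
      exact scan_fold t [a] (a, 1, a, 1) hinv0
        (fun x hx y hy => by
          simp at hx; rw [hx]
          exact (List.pairwise_cons.1 hpw).1 y hy)
        (List.pairwise_cons.1 hpw).2
    rw [List.singleton_append] at hinv
    obtain ⟨_, _, _, hbcm, hbl, hbest⟩ := hinv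
    set res := (a :: t).foldl scanStep
        (PySem.List.pyGetD (a :: t) 0 ' ', 0, PySem.List.pyGetD (a :: t) 0 ' ', 0) with hres
    -- B's best pair is an item of Counter(col)
    have hbcol : res.1 ∈ col := hsp.mem_iff.1 hbcm
    have hbitem : (res.1, res.2.1) ∈ (PySem.Dict.counter col).items := by
      rw [PySem.Dict.items_counter]
      have : res.1 ∈ PySem.Set.ofList col := (PySem.Set.mem_ofList _ _).2 hbcol
      have hmem := List.mem_map_of_mem (f := fun k => (k, (col.count k : Int))) this
      have hcnt : res.2.1 = (col.count res.1 : Int) := by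
        rw [hbl, hsp.count_eq]
      rw [hcnt]
      exact hmem
    -- A's pick
    obtain ⟨hAm, hAmin⟩ := pickA_spec (PySem.Dict.counter col).items (items_ne_nil col hne)
    set pa := PySem.List.pyGetD
      (PySem.List.sorted2 (PySem.Dict.counter col).items (fun x => -x.2) (fun x => x.1)) 0 (' ', 0) with hpa
    -- A's pick is (k, count k) for some k ∈ col
    rw [PySem.Dict.items_counter] at hAm
    obtain ⟨k, hk, hkeq⟩ := List.mem_map.1 hAm
    have hkcol : k ∈ col := (PySem.Set.mem_ofList _ _).1 hk
    -- neither beats the other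
    have h1 : pvLt (res.1, res.2.1) pa = false := hAmin _ hbitem
    have h2 : pvLt pa (res.1, res.2.1) = false := by
      have := hbest k (hsp.mem_iff.2 hkcol)
      rw [hsp.count_eq] at this
      rw [← hkeq]
      simpa using this
    exact pvLt_eq_of_not_either h2 h1

lemma temp_eq (text : List String) (i : Int) :
    (PySem.List.pyRange 0 (PySem.List.len text) 1).foldl
      (fun acc j => acc ++ [PySem.List.pyGetD (PySem.List.pyGetD text j "").toList i ' ']) []
    = text.map (colf i) := by
  rw [PySem.List.foldl_append_singleton_eq_map
    (fun j => PySem.List.pyGetD (PySem.List.pyGetD text j "").toList i ' ')]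
  rw [List.nil_append]
  have h := PySem.List.map_pyGetD_pyRange_zero' text ""
  calc (PySem.List.pyRange 0 (PySem.List.len text) 1).map
        (fun j => colf i (PySem.List.pyGetD text j ""))
      = ((PySem.List.pyRange 0 (PySem.List.len text) 1).map
          (fun j => PySem.List.pyGetD text j "")).map (colf i) := by
        rw [List.map_map]; rfl
    _ = text.map (colf i) := by
        simp only [PySem.List.len_eq] at *
        rw [h]

theorem main (text : List String) (h1 : text ≠ []) : solution text = solution_alt text := by
  simp only [solution, solution_alt]
  refine congrArg (fun r : List Char × Int => (String.ofList r.1, r.2)) ?_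
  apply PySem.List.foldl_congr_mem
  intro acc i hi
  rw [temp_eq text i]
  rw [col_pick_eq (text.map (colf i)) (by simpa using h1)]

-- ===== VERDICT (by name: the statement is the Claim_ definition above) =====
theorem solution_spec : Claim_equal_solution := by
  intro text _ hpre
  unfold Spec_solution
  exact main text hpre.1
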